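-- pv_equiv track=rewrite | github.com/eliottcassidy2000/math | 04-computation/eigenspace_identity_proof_local.py | all_tournament_conn_sets
-- ===== SOURCE A (Python) =====
-- def all_tournament_conn_sets(p):
--     """Generate all valid tournament connection sets on Z_p.
--     For each pair (d, p-d), choose exactly one."""
--     pairs = []
--     used = set()
--     for d in range(1, p):
--         if d not in used:
--             pairs.append((d, p - d))
--             used.add(d)
--             used.add(p - d)
--     # Generate all 2^len(pairs) choices
--     results = []
--     for mask in range(2**len(pairs)):
--         S = set()
--         for i, (a, b) in enumerate(pairs):
--             if mask & (1 << i):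
--                 S.add(b)
--             else:
--                 S.add(a)
--         results.append(frozenset(S))
--     return results
-- ===== SOURCE B (Python) =====
-- def _conn_set(c, pairs):
--     S = set()
--     for bit, (a, b) in zip(c, pairs):
--         S.add(b if bit else a)
--     return frozenset(S)
--
--
-- def all_tournament_conn_sets(p):
--     """Generate all valid tournament connection sets on Z_p.
--     For each pair (d, p-d), choose exactly one.
--     B: enumerate the choices by incremental list doubling (no bitmasks):
--     each pair splits every partial choice vector in two, the newest bit
--     prepended so that the first pair varies fastest, matching A's order."""
--     pairs = []
--     used = set()
--     for d in range(1, p):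
--         if d not in used:
--             pairs.append((d, p - d))
--             used.add(d)
--             used.add(p - d)
--     choices = [[]]
--     for _ in pairs:
--         choices = [ext for c in choices for ext in ([False] + c, [True] + c)]
--     return [_conn_set(c, pairs) for c in choices]
-- ===== Notes on version B (the rewrite author's own statement) =====
-- stated objective: alternative
-- what changed: Replaces A's indexed bitmask enumeration (a range over all masks with per-pair bit tests) by incremental list doubling: each pair splits every partial choice vector in two, so all choices are built by repeated branching with no bit manipulation.
import Mathlib
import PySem

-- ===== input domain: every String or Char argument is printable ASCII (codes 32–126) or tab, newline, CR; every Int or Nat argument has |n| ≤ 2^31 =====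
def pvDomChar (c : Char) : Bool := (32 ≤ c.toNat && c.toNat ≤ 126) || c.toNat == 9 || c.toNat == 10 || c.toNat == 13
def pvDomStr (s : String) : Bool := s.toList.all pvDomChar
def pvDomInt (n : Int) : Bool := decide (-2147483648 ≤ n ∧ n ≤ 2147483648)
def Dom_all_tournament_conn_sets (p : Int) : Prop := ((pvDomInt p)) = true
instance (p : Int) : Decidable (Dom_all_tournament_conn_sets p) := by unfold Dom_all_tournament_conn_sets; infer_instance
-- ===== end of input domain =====

-- B replaces A's bitmask enumeration by incremental list doubling over the pairs (objective: alternative; same cost).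

-- ===== PORT A =====
-- pairs/used loop of A (used is a Python set)
def pvA_pairs (p : Int) : List (Int × Int) :=
  ((PySem.List.pyRange 1 p 1).foldl
    (fun (st : List (Int × Int) × PySem.Set Int) d =>
      if ¬ PySem.Set.contains st.2 d then
        (st.1 ++ [(d, p - d)], PySem.Set.add (PySem.Set.add st.2 d) (p - d))
      else st)
    ([], PySem.Set.empty)).1

-- inner loop of A: build S for one mask (enumerate index is ≥ 0, so .toNat is exact for Python's 1 << i)
def pvA_setOf (pairs : List (Int × Int)) (mask : Int) : List Int :=
  (PySem.List.enumerate pairs 0).foldl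
    (fun (S : PySem.Set Int) ib =>
      if PySem.Int.band mask ((1 : Int) <<< ib.1.toNat) ≠ 0 then PySem.Set.add S ib.2.2
      else PySem.Set.add S ib.2.1)
    PySem.Set.empty

def all_tournament_conn_sets (p : Int) : List (List Int) :=
  (PySem.List.pyRange 0 ((2 : Int) ^ (pvA_pairs p).length) 1).foldl
    (fun results mask => results ++ [pvA_setOf (pvA_pairs p) mask]) []

-- ===== PORT B =====
-- pairs/used loop of B (same code as in Source B)
def pvB_pairs (p : Int) : List (Int × Int) :=
  ((PySem.List.pyRange 1 p 1).foldl
    (fun (st : List (Int × Int) × PySem.Set Int) d =>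
      if ¬ PySem.Set.contains st.2 d then
        (st.1 ++ [(d, p - d)], PySem.Set.add (PySem.Set.add st.2 d) (p - d))
      else st)
    ([], PySem.Set.empty)).1

-- _conn_set of Source B
def pvB_connSet (c : List Bool) (pairs : List (Int × Int)) : List Int :=
  (c.zip pairs).foldl
    (fun (S : PySem.Set Int) bp => PySem.Set.add S (if bp.1 then bp.2.2 else bp.2.1))
    PySem.Set.empty

-- the doubling loop over pairs of Source B
def pvB_choices (pairs : List (Int × Int)) : List (List Bool) :=
  pairs.foldl (fun (chs : List (List Bool)) _ => chs.flatMap (fun c => [false :: c, true :: c])) [[]]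

def all_tournament_conn_sets_alt (p : Int) : List (List Int) :=
  (pvB_choices (pvB_pairs p)).map (fun c => pvB_connSet c (pvB_pairs p))

-- ===== PRECONDITION & SPEC =====
def Spec_all_tournament_conn_sets (p : Int) (out : List (List Int)) : Prop := out = all_tournament_conn_sets_alt p
instance (p : Int) (out : List (List Int)) : Decidable (Spec_all_tournament_conn_sets p out) := by unfold Spec_all_tournament_conn_sets; infer_instance

-- ===== CLAIM (what is proved, stated in full; the proofs are below) =====
def Claim_equal_all_tournament_conn_sets : Prop := ∀ (p : Int), Dom_all_tournament_conn_sets p → Spec_all_tournament_conn_sets p (all_tournament_conn_sets p)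

-- ===== LEMMAS AND PROOFS =====

-- bits of a mask, least significant first
def pvBits : Nat → Nat → List Bool
  | _, 0 => []
  | m, n + 1 => m.testBit 0 :: pvBits (m >>> 1) n

theorem pv_foldl_append_map {α β : Type} (l : List α) (f : α → β) (init : List β) :
    l.foldl (fun r m => r ++ [f m]) init = init ++ l.map f := by
  induction l generalizing init with
  | nil => simp
  | cons x xs ih => simp [List.foldl_cons, ih]

theorem pv_range_two_mul (N : Nat) :
    List.range (2 * N) = (List.range N).flatMap (fun m => [2 * m, 2 * m + 1]) := by
  induction N with
  | zero => simp
  | succ n ih =>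
      have : 2 * (n + 1) = (2 * n + 1) + 1 := by ring
      rw [this, List.range_succ, List.range_succ, List.range_succ, ih]
      simp [List.flatMap_append]

theorem pv_step_iterate {α : Type} (l : List α) (g : List (List Bool) → List (List Bool))
    (x : List (List Bool)) : l.foldl (fun a _ => g a) x = g^[l.length] x := by
  induction l generalizing x with
  | nil => simp
  | cons y ys ih => simp [List.foldl_cons, ih, Function.iterate_succ_apply]

theorem pv_choices_eq (n : Nat) :
    (fun chs => chs.flatMap (fun c => [false :: c, true :: c]))^[n] [[]] =
      (List.range (2 ^ n)).map (fun m => pvBits m n) := by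
  induction n with
  | zero => simp [pvBits]
  | succ n ih =>
      rw [Function.iterate_succ_apply', ih]
      have h2 : 2 ^ (n + 1) = 2 * 2 ^ n := by ring
      rw [h2, pv_range_two_mul, List.flatMap_map, List.map_flatMap]
      refine List.flatMap_congr (fun m _ => ?_)
      have e1 : pvBits (2 * m) (n + 1) = false :: pvBits m n := by
        simp [pvBits, Nat.testBit_zero, Nat.shiftRight_succ]
      have e2 : pvBits (2 * m + 1) (n + 1) = true :: pvBits m n := by
        simp [pvBits, Nat.testBit_zero, Nat.shiftRight_succ]
        congr 1
        omega
      simp [e1, e2]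

theorem pv_test (m i : Nat) :
    (PySem.Int.band (Int.ofNat m) ((1 : Int) <<< ((i : Nat) : Int)) ≠ 0) ↔ m.testBit i := by
  rw [Int.one_shiftLeft, show Int.ofNat m = ((m : Nat) : Int) from rfl, PySem.Int.band_natCast,
    Nat.and_two_pow]
  cases h : m.testBit i <;> simp

theorem pv_setOf_eq (pairs : List (Int × Int)) (s m : Nat) (S : PySem.Set Int) :
    (PySem.List.enumerate pairs (s : Int)).foldl
      (fun (S : PySem.Set Int) ib =>
        if PySem.Int.band (Int.ofNat m) ((1 : Int) <<< ib.1.toNat) ≠ 0 then PySem.Set.add S ib.2.2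
        else PySem.Set.add S ib.2.1) S =
    ((pvBits (m >>> s) pairs.length).zip pairs).foldl
      (fun (S : PySem.Set Int) bp => PySem.Set.add S (if bp.1 then bp.2.2 else bp.2.1)) S := by
  induction pairs generalizing s S with
  | nil => simp [PySem.List.enumerate_nil, pvBits]
  | cons hd tl ih =>
      have hcond : (PySem.Int.band (Int.ofNat m) ((1 : Int) <<< (((s : Int)).toNat : Int)) ≠ 0) ↔ m.testBit s := by
        simpa using pv_test m s
      rw [PySem.List.enumerate_cons, List.foldl_cons, List.length_cons]
      simp only [pvBits, List.zip_cons_cons, List.foldl_cons]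
      have hb : (m >>> s).testBit 0 = m.testBit s := by
        simp
      have hs' : (m >>> s) >>> 1 = m >>> (s + 1) := by
        rw [Nat.shiftRight_add]
      have hcast : ((s : Int) + 1) = ((s + 1 : Nat) : Int) := by push_cast; ring
      rw [hb, hs', hcast]
      by_cases h : m.testBit s
      · rw [if_pos (hcond.mpr h), if_pos (by simp [h])]
        exact ih (s + 1) _
      · rw [if_neg (by simpa [h] using hcond), if_neg (by simp [h])]
        exact ih (s + 1) _

-- ===== VERDICT (by name: the statement is the Claim_ definition above) =====
theorem all_tournament_conn_sets_spec : Claim_equal_all_tournament_conn_sets := by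
  intro p _
  unfold Spec_all_tournament_conn_sets all_tournament_conn_sets all_tournament_conn_sets_alt
  have hpairs : pvB_pairs p = pvA_pairs p := rfl
  rw [hpairs]
  rw [pv_foldl_append_map, PySem.List.pyRange_one]
  rw [show pvB_choices (pvA_pairs p) =
        (fun chs => chs.flatMap (fun c => [false :: c, true :: c]))^[(pvA_pairs p).length] [[]]
      from pv_step_iterate (pvA_pairs p) _ [[]] ]
  rw [pv_choices_eq]
  have hN : (((2 : Int) ^ (pvA_pairs p).length) - 0).toNat = 2 ^ (pvA_pairs p).length := by
    rw [sub_zero,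
      show ((2 : Int) ^ (pvA_pairs p).length) = ((2 ^ (pvA_pairs p).length : Nat) : Int) by push_cast; ring,
      Int.toNat_natCast]
  rw [hN, List.map_map, List.map_map]
  refine List.map_congr_left (fun m _ => ?_)
  show pvA_setOf (pvA_pairs p) ((0 : Int) + (m : Int)) = pvB_connSet (pvBits m (pvA_pairs p).length) (pvA_pairs p)
  have h0 : ((0 : Int) + (m : Int)) = Int.ofNat m := by rw [Int.zero_add]; rfl
  rw [h0]
  unfold pvA_setOf pvB_connSet
  simpa using pv_setOf_eq (pvA_pairs p) 0 m PySem.Set.empty
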